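-- pv_equiv track=rewrite | github.com/4fthaab/aim26prep | Leetcode Solutions/Char Rank.py | compareRanks
-- ===== SOURCE A (Python) =====
-- def compareRanks(s):
--     st=list(s)
--     values=sorted(set(st))
--     li={}
--     i=1
--     for c in values:
--         li[c]=i
--         i+=1
--     result=[]
--     for c in st:
--         result.append(li[c])
--     return result
-- ===== SOURCE B (Python) =====
-- def compareRanks(s):
--     dist = set(s)
--     return [1 + sum(1 for d in dist if d < c) for c in s]
-- ===== Notes on version B (the rewrite author's own statement) =====
-- stated objective: simpler
-- what changed: Replaces sort-the-distinct-chars + dict-of-ranks + lookup loop with a direct closed form: each char's rank is 1 + the number of distinct characters smaller than it, computed by counting over the distinct set.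
import Mathlib
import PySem

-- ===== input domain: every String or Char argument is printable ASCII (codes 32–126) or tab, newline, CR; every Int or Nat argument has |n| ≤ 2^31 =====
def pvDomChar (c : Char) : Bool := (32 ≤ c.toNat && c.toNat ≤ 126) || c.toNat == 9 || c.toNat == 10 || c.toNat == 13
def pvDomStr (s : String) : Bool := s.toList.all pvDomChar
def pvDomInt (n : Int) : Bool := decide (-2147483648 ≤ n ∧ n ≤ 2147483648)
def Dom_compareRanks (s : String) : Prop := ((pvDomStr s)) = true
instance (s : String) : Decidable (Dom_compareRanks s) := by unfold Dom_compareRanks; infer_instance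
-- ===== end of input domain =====

-- B replaces A's sorted-distinct-chars + rank dict with a closed form: rank(c) = 1 + #distinct chars < c (simpler decomposition, same cost class).


-- ===== PORT A =====
-- st = list(s); values = sorted(set(st)); li = {} built by counting loop from 1; result = [li[c] for c in st].
-- li[c] is ported as getD with default 0: exact, since every c of st is a key of li (KeyError never occurs).
def compareRanks (s : String) : List Int :=
  let st := s.toList
  let values := PySem.List.sorted (PySem.Set.ofList st) (fun c => c) false
  let li := values.foldl (fun (p : PySem.Dict Char Int × Int) c => (p.1.insert c p.2, p.2 + 1)) (PySem.Dict.empty, 1)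
  st.foldl (fun acc c => acc ++ [li.1.getD c 0]) []

-- ===== PORT B =====
-- dist = set(s); [1 + sum(1 for d in dist if d < c) for c in s]  (sum of ones over a filter = countP; order-independent)
def compareRanks_alt (s : String) : List Int :=
  let dist := PySem.Set.ofList s.toList
  s.toList.map (fun c => 1 + (dist.countP (fun d => decide (d < c)) : Int))

-- ===== PRECONDITION & SPEC =====
def Spec_compareRanks (s : String) (out : List Int) : Prop := out = compareRanks_alt s
instance (s : String) (out : List Int) : Decidable (Spec_compareRanks s out) := by unfold Spec_compareRanks; infer_instance

-- ===== CLAIM (what is proved, stated in full; the proofs are below) =====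
def Claim_equal_compareRanks : Prop := ∀ (s : String), Dom_compareRanks s → Spec_compareRanks s (compareRanks s)

-- ===== LEMMAS AND PROOFS =====

-- the rank-dict loop leaves keys not in vs untouched
lemma dictLoop_getD_not_mem (vs : List Char) (c : Char) (h : c ∉ vs) :
    ∀ (d : PySem.Dict Char Int) (i : Int),
      ((vs.foldl (fun (p : PySem.Dict Char Int × Int) x => (p.1.insert x p.2, p.2 + 1)) (d, i)).1).getD c 0
        = d.getD c 0 := by
  induction vs with
  | nil => intro d i; rfl
  | cons v vs ih =>
    intro d i
    simp only [List.foldl_cons]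
    rw [ih (by simp_all) (d.insert v i) (i + 1)]
    exact PySem.Dict.getD_insert_of_ne d i 0 (fun hc => h (by rw [hc]; exact List.mem_cons_self))

-- the rank-dict loop maps the k-th key of vs (nodup) to i + k
lemma dictLoop_getD_mem (vs : List Char) (c : Char) (hnd : vs.Nodup) (hc : c ∈ vs) :
    ∀ (d : PySem.Dict Char Int) (i : Int),
      ((vs.foldl (fun (p : PySem.Dict Char Int × Int) x => (p.1.insert x p.2, p.2 + 1)) (d, i)).1).getD c 0
        = i + (vs.idxOf c : Int) := by
  induction vs with
  | nil => cases hc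
  | cons v vs ih =>
    intro d i
    simp only [List.foldl_cons]
    by_cases hcv : c = v
    · subst hcv
      have hnotin : c ∉ vs := (List.nodup_cons.mp hnd).1
      rw [dictLoop_getD_not_mem vs c hnotin (d.insert c i) (i + 1),
          PySem.Dict.getD_insert_self]
      simp [List.idxOf_cons_self]
    · have hcvs : c ∈ vs := by
        rcases List.mem_cons.mp hc with h | h
        · exact absurd h hcv
        · exact h
      rw [ih (List.nodup_cons.mp hnd).2 hcvs (d.insert v i) (i + 1)]
      have hvc : (v == c) = false := by
        simp only [beq_eq_false_iff_ne]; exact fun h => hcv h.symm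
      have : (v :: vs).idxOf c = vs.idxOf c + 1 := by
        simp [List.idxOf_cons, hvc]
      rw [this]; push_cast; ring

-- in a strictly increasing list, the index of c is the number of elements below c
lemma idxOf_eq_countP_lt (vs : List Char) (hp : vs.Pairwise (· < ·)) (c : Char) (hc : c ∈ vs) :
    vs.idxOf c = vs.countP (fun d => decide (d < c)) := by
  induction vs with
  | nil => cases hc
  | cons v vs ih =>
    have hlt : ∀ d ∈ vs, v < d := (List.pairwise_cons.mp hp).1
    by_cases hcv : c = v
    · subst hcv
      have h0 : vs.countP (fun d => decide (d < c)) = 0 := by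
        apply List.countP_eq_zero.mpr
        intro d hd
        simp only [decide_eq_true_eq]
        exact not_lt.mpr (le_of_lt (hlt d hd))
      simp [List.idxOf_cons_self, h0]
    · have hcvs : c ∈ vs := by
        rcases List.mem_cons.mp hc with h | h
        · exact absurd h hcv
        · exact h
      have hvlt : v < c := hlt c hcvs
      have hvc : (v == c) = false := by
        simp only [beq_eq_false_iff_ne]; exact fun h => hcv h.symm
      have : (v :: vs).idxOf c = vs.idxOf c + 1 := by
        simp [List.idxOf_cons, hvc]
      rw [this, List.countP_cons, ih (List.pairwise_cons.mp hp).2 hcvs]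
      simp [hvlt]

-- per-element value of A equals per-element value of B
lemma rank_value_eq (st : List Char) (c : Char) (hc : c ∈ st) :
    ((PySem.List.sorted (PySem.Set.ofList st) (fun x => x) false).foldl
        (fun (p : PySem.Dict Char Int × Int) x => (p.1.insert x p.2, p.2 + 1))
        (PySem.Dict.empty, 1)).1.getD c 0
      = 1 + ((PySem.Set.ofList st).countP (fun d => decide (d < c)) : Int) := by
  set vs := PySem.List.sorted (PySem.Set.ofList st) (fun x => x) false with hvs
  have hperm : vs.Perm (PySem.Set.ofList st) := PySem.List.sorted_perm ..
  have hnd : vs.Nodup := hperm.nodup_iff.mpr (PySem.Set.nodup_ofList st)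
  have hcv : c ∈ vs := hperm.mem_iff.mpr ((PySem.Set.mem_ofList ..).mpr hc)
  have hpw : vs.Pairwise (· < ·) := PySem.List.sorted_ofList_pairwise_lt ..
  rw [dictLoop_getD_mem vs c hnd hcv PySem.Dict.empty 1,
      idxOf_eq_countP_lt vs hpw c hcv, hperm.countP_eq]

-- ===== VERDICT (by name: the statement is the Claim_ definition above) =====
theorem compareRanks_spec : Claim_equal_compareRanks := by
  intro s _
  unfold Spec_compareRanks compareRanks compareRanks_alt
  rw [PySem.List.foldl_append_singleton_eq_map, List.nil_append]
  exact List.map_congr_left (fun c hc => rank_value_eq s.toList c hc)
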